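-- pv_equiv track=rewrite | github.com/masyahook/4sem_fin_test_prep | 8_min_cycle.py | find_min_cycle
-- ===== SOURCE A (Python) =====
-- def find_min_cycle(graph):
--     min_time = float('+inf')
--     suitable_path = []
--     for vertex in graph:
--         path = {}
--         used = {vertex}
--         queue = [(vertex, 0)]
--         path[vertex] = [vertex]
--         while queue:
--             current, time = queue.pop(0)
--             time += 1
--             if time >= min_time:
--                 break
--             for neighbour in graph.get(current, []):
--                 if neighbour not in used:
--                     queue.append((neighbour, time))
--                     used.add(neighbour)
--                     path[neighbour] = path[current] + [neighbour]
--                 elif neighbour == vertex: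
--                     min_time = time
--                     suitable_path = path[current] + [vertex]
--                     break
--             path.pop(current)
--     return suitable_path
-- ===== SOURCE B (Python) =====
-- def find_min_cycle(graph):
--     min_time = None
--     suitable_path = []
--     for start in graph:
--         parent = {start: None}
--         queue = [(start, 0)]
--         i = 0
--         while i < len(queue):
--             current, time = queue[i]
--             i += 1
--             time += 1
--             if min_time is not None and time >= min_time:
--                 break
--             hit = False
--             for nb in graph.get(current, []):
--                 if nb == start:
--                     hit = True
--                     break
--                 if nb not in parent:
--                     parent[nb] = current
--                     queue.append((nb, time))
--             if hit:
--                 min_time = time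
--                 rev = []
--                 node = current
--                 while node is not None:
--                     rev.append(node)
--                     node = parent[node]
--                 suitable_path = rev[::-1] + [start]
--                 break
--     return suitable_path
-- ===== Notes on version B (the rewrite author's own statement) =====
-- stated objective: alternative
-- what changed: A copies the whole discovery path on every edge (path[nb] = path[cur] + [nb]) and dequeues with list.pop(0); B stores only a parent pointer per discovered vertex, walks an index cursor over the append-only queue, and reconstructs the one winning path once by climbing the parent chain (intended as faster; a timing run measured ~2x at the largest size both finished but could not confirm it under its >=1.5x-with-timeout rule).
import Mathlib
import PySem

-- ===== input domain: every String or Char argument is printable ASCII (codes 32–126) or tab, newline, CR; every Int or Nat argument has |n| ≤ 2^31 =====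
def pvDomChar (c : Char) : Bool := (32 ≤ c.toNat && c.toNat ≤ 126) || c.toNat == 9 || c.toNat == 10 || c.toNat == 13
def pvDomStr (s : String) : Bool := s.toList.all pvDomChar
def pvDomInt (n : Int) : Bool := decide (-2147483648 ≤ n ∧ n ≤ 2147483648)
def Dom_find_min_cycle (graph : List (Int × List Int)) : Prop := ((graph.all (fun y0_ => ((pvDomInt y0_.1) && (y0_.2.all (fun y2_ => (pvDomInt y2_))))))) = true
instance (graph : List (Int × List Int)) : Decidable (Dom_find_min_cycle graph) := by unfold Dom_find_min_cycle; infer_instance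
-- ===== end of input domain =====

-- B replaces A's per-edge path copying (path[nb] = path[cur] + [nb]) and list.pop(0) dequeues by
-- parent pointers with a single path reconstruction at the hit, and an index cursor into the queue.
-- Both loops are while-loops bounded only by the BFS frontier; the ports run them on a fuel that
-- provably exceeds the number of iterations (each iteration dequeues one vertex, every vertex is
-- enqueued at most once, and all enqueued vertices besides the start come from the neighbour lists).

-- ===== PORT A =====
-- `time >= min_time` where min_time : Option Int models float('+inf') as none
def pvGeInf (t : Int) (mt : Option Int) : Bool :=
  match mt with
  | none => false
  | some m => decide (m ≤ t)

-- A's inner `for neighbour in graph.get(current, [])` with its `elif neighbour == vertex: … break`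
def pvAScan (vertex current : Int) (time : Int) :
    List Int → List (Int × Int) → PySem.Set Int → PySem.Dict Int (List Int) → Option Int → List Int →
    (List (Int × Int) × PySem.Set Int × PySem.Dict Int (List Int) × Option Int × List Int)
  | [], q, used, path, mt, sp => (q, used, path, mt, sp)
  | nb :: rest, q, used, path, mt, sp =>
    if PySem.Set.contains used nb = false then
      pvAScan vertex current time rest (q ++ [(nb, time)]) (PySem.Set.add used nb)
        (path.insert nb (path.getD current [] ++ [nb])) mt sp
    else if nb == vertex then
      (q, used, path, some time, path.getD current [] ++ [vertex])
    else
      pvAScan vertex current time rest q used path mt sp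

-- A's `while queue:` loop; `path.pop(current)` never raises (current was enqueued exactly once,
-- with path[current] set), so it is ported as Dict.erase
def pvAWhile (g : PySem.Dict Int (List Int)) (vertex : Int) :
    Nat → List (Int × Int) → PySem.Set Int → PySem.Dict Int (List Int) → Option Int → List Int →
    Option Int × List Int
  | 0, _, _, _, mt, sp => (mt, sp)
  | _ + 1, [], _, _, mt, sp => (mt, sp)
  | f + 1, (current, t0) :: rest, used, path, mt, sp =>
    let time := t0 + 1
    if pvGeInf time mt then (mt, sp)
    else
      match pvAScan vertex current time (g.getD current []) rest used path mt sp with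
      | (q', used', path', mt', sp') => pvAWhile g vertex f q' used' (path'.erase current) mt' sp'

def find_min_cycle (graph : List (Int × List Int)) : List Int :=
  let g : PySem.Dict Int (List Int) := PySem.Dict.mk graph
  let fuel := (graph.flatMap (fun p => p.2)).length + 2
  (g.keys.foldl (fun acc vertex =>
      pvAWhile g vertex fuel [(vertex, 0)] (PySem.Set.ofList [vertex])
        ((PySem.Dict.empty).insert vertex [vertex]) acc.1 acc.2)
    ((none : Option Int), ([] : List Int))).2

-- ===== PORT B =====
-- B's inner `for nb in graph.get(current, [])`: break with hit=True on nb == start,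
-- otherwise record a parent pointer for each newly discovered vertex
def pvBScan (start current : Int) (time : Int) :
    List Int → List (Int × Int) → PySem.Dict Int (Option Int) →
    (List (Int × Int) × PySem.Dict Int (Option Int) × Bool)
  | [], q, parent => (q, parent, false)
  | nb :: rest, q, parent =>
    if nb == start then (q, parent, true)
    else if parent.contains nb = false then
      pvBScan start current time rest (q ++ [(nb, time)]) (parent.insert nb (some current))
    else
      pvBScan start current time rest q parent

-- B's reconstruction loop `while node is not None: rev.append(node); node = parent[node]`;
-- the parent chain visits distinct keys of parent, so parent.size + 1 steps always finish it
def pvClimb : Nat → PySem.Dict Int (Option Int) → Int → List Int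
  | 0, _, _ => []
  | f + 1, parent, node =>
    match parent.getD node none with
    | none => [node]
    | some p => node :: pvClimb f parent p

-- B's `while i < len(queue):` loop, with the index cursor i into the append-only queue
def pvBWhile (g : PySem.Dict Int (List Int)) (start : Int) :
    Nat → List (Int × Int) → Nat → PySem.Dict Int (Option Int) → Option Int → List Int →
    Option Int × List Int
  | 0, _, _, _, mt, sp => (mt, sp)
  | f + 1, q, i, parent, mt, sp =>
    match q[i]? with
    | none => (mt, sp)
    | some (current, t0) =>
      let time := t0 + 1
      if pvGeInf time mt then (mt, sp)
      else
        match pvBScan start current time (g.getD current []) q parent with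
        | (q', parent', hit) =>
          if hit then
            (some time, (pvClimb (parent'.size + 1) parent' current).reverse ++ [start])
          else
            pvBWhile g start f q' (i + 1) parent' mt sp

def find_min_cycle_alt (graph : List (Int × List Int)) : List Int :=
  let g : PySem.Dict Int (List Int) := PySem.Dict.mk graph
  let fuel := (graph.flatMap (fun p => p.2)).length + 2
  (g.keys.foldl (fun acc start =>
      pvBWhile g start fuel [(start, 0)] 0 ((PySem.Dict.empty).insert start (none : Option Int))
        acc.1 acc.2)
    ((none : Option Int), ([] : List Int))).2

-- ===== PRECONDITION & SPEC =====
def Spec_find_min_cycle (graph : List (Int × List Int)) (out : List Int) : Prop := out = find_min_cycle_alt graph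
instance (graph : List (Int × List Int)) (out : List Int) : Decidable (Spec_find_min_cycle graph out) := by unfold Spec_find_min_cycle; infer_instance

-- ===== CLAIM (what is proved, stated in full; the proofs are below) =====
def Claim_equal_find_min_cycle : Prop := ∀ (graph : List (Int × List Int)), Dom_find_min_cycle graph → Spec_find_min_cycle graph (find_min_cycle graph)

-- ===== LEMMAS AND PROOFS =====

-- the discovery chain that B's parent dictionary encodes: x, parent[x], …, ending where parent[·] is None
inductive PChain (parent : PySem.Dict Int (Option Int)) : Int → List Int → Prop
  | last {x : Int} : parent.getD x none = none → PChain parent x [x]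
  | step {x p : Int} {l : List Int} : parent.getD x none = some p → PChain parent p l →
      PChain parent x (x :: l)

-- the invariant tying A's stored path of a pending vertex to B's parent chain of that vertex
def EntryInv (parent : PySem.Dict Int (Option Int)) (path : PySem.Dict Int (List Int))
    (x : Int) : Prop :=
  ∃ l, PChain parent x l ∧ l.Nodup ∧ (∀ n ∈ l, parent.contains n = true) ∧
    path.getD x [] = l.reverse

theorem pchain_head_mem {parent : PySem.Dict Int (Option Int)} {x : Int} {l : List Int}
    (hc : PChain parent x l) : x ∈ l := by
  cases hc <;> exact List.mem_cons_self

theorem pvSet_contains_add (s : PySem.Set Int) (x y : Int) :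
    PySem.Set.contains (PySem.Set.add s x) y = (PySem.Set.contains s y || (y == x)) := by
  by_cases hyx : y = x
  · subst hyx; by_cases hy : y ∈ s <;> simp [PySem.Set.add, PySem.Set.contains, hy]
  · by_cases hxs : x ∈ s <;> simp [PySem.Set.add, PySem.Set.contains, hxs, hyx]

theorem pvDict_get?_erase_of_ne {ν : Type} (d : PySem.Dict Int ν) (k x : Int)
    (h : x ≠ k) : (d.erase k).get? x = d.get? x := by
  obtain ⟨items⟩ := d
  simp only [PySem.Dict.erase, PySem.Dict.get?]
  induction items with
  | nil => rfl
  | cons p t ih =>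
    by_cases hk2 : p.1 = k
    · rw [List.filter_cons_of_neg (by simp [hk2])]
      rw [List.find?_cons_of_neg (by simp [hk2]; exact fun hh => h hh.symm)]
      exact ih
    · rw [List.filter_cons_of_pos (by simp [hk2])]
      by_cases hp : p.1 = x
      · rw [List.find?_cons_of_pos (by simp [hp]), List.find?_cons_of_pos (by simp [hp])]
      · rw [List.find?_cons_of_neg (by simp [hp]), List.find?_cons_of_neg (by simp [hp])]
        exact ih

theorem pvDict_getD_erase_of_ne {ν : Type} (d : PySem.Dict Int ν) (k x : Int) (dflt : ν)
    (h : x ≠ k) : (d.erase k).getD x dflt = d.getD x dflt := by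
  rw [PySem.Dict.getD_eq_get?_getD, PySem.Dict.getD_eq_get?_getD, pvDict_get?_erase_of_ne d k x h]

theorem pchain_insert_fresh {parent : PySem.Dict Int (Option Int)} {x k : Int} {w : Option Int}
    {l : List Int} (hc : PChain parent x l) (hsub : ∀ n ∈ l, parent.contains n = true)
    (hk : parent.contains k = false) : PChain (parent.insert k w) x l := by
  induction hc with
  | @last y hy =>
    have hne : y ≠ k := fun hyk => by
      rw [← hyk, hsub y List.mem_cons_self] at hk; simp at hk
    exact PChain.last (by rw [PySem.Dict.getD_insert, if_neg hne, hy])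
  | @step y p l' hy hcl ih =>
    have hne : y ≠ k := fun hyk => by
      rw [← hyk, hsub y List.mem_cons_self] at hk; simp at hk
    exact PChain.step (by rw [PySem.Dict.getD_insert, if_neg hne, hy])
      (ih (fun n hn => hsub n (List.mem_cons_of_mem _ hn)))

theorem pvClimb_eq {parent : PySem.Dict Int (Option Int)} {x : Int} {l : List Int}
    (hc : PChain parent x l) : ∀ f : Nat, l.length ≤ f → pvClimb f parent x = l := by
  induction hc with
  | @last y hy =>
    intro f hf
    cases f with
    | zero => simp at hf
    | succ f => simp [pvClimb, hy]
  | @step y p l' hy hcl ih =>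
    intro f hf
    cases f with
    | zero => simp at hf
    | succ f =>
      simp only [pvClimb, hy]
      rw [ih f (by simpa using hf)]

theorem pvScan_eq (v current time : Int) :
    ∀ (nbrs : List Int) (qA qB : List (Int × Int)) (used : PySem.Set Int)
      (path : PySem.Dict Int (List Int)) (parent : PySem.Dict Int (Option Int))
      (mt : Option Int) (sp : List Int),
    (∀ x : Int, PySem.Set.contains used x = parent.contains x) →
    parent.keys.Nodup →
    parent.contains v = true →
    EntryInv parent path current →
    ∃ (news : List Int) (used' : PySem.Set Int) (path' : PySem.Dict Int (List Int))
      (parent' : PySem.Dict Int (Option Int)),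
      (∀ x : Int, PySem.Set.contains used' x = parent'.contains x) ∧
      parent'.keys.Nodup ∧
      (∀ x : Int, parent.contains x = true → parent'.contains x = true) ∧
      (∀ x : Int, parent.contains x = true → path'.getD x [] = path.getD x []) ∧
      (∀ (x : Int) (l : List Int), PChain parent x l →
        (∀ n ∈ l, parent.contains n = true) → PChain parent' x l) ∧
      news.Nodup ∧
      (∀ y ∈ news, PySem.Set.contains used y = false ∧ EntryInv parent' path' y) ∧
      ((pvAScan v current time nbrs qA used path mt sp
          = (qA ++ news.map (fun y => (y, time)), used', path', mt, sp) ∧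
        pvBScan v current time nbrs qB parent
          = (qB ++ news.map (fun y => (y, time)), parent', false))
       ∨
       (pvAScan v current time nbrs qA used path mt sp
          = (qA ++ news.map (fun y => (y, time)), used', path', some time,
             path.getD current [] ++ [v]) ∧
        pvBScan v current time nbrs qB parent
          = (qB ++ news.map (fun y => (y, time)), parent', true))) := by
  intro nbrs
  induction nbrs with
  | nil =>
    intro qA qB used path parent mt sp heq hnd hv _
    exact ⟨[], used, path, parent, heq, hnd, fun _ h => h, fun _ _ => rfl,
      fun _ _ hc _ => hc, by simp, by simp,
      Or.inl ⟨by simp [pvAScan], by simp [pvBScan]⟩⟩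
  | cons nb rest ih =>
    intro qA qB used path parent mt sp heq hnd hv hcurE
    obtain ⟨lc, hcChain, hcNodup, hcSub, hcPath⟩ := hcurE
    have hcurcont : parent.contains current = true := hcSub current (pchain_head_mem hcChain)
    by_cases hnbv : nb = v
    · subst hnbv
      have hvused : PySem.Set.contains used nb = true := by rw [heq]; exact hv
      have hvmem : nb ∈ used := by simpa [PySem.Set.contains] using hvused
      refine ⟨[], used, path, parent, heq, hnd, fun _ h => h, fun _ _ => rfl,
        fun _ _ hc _ => hc, by simp, by simp, Or.inr ⟨?_, ?_⟩⟩
      · simp [pvAScan, hvmem]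
      · simp [pvBScan]
    · by_cases hfresh : PySem.Set.contains used nb = false
      · have hnmem : nb ∉ used := by simpa [PySem.Set.contains] using hfresh
        have hpf : parent.contains nb = false := by rw [← heq]; exact hfresh
        have hnbcur : nb ≠ current := fun h => by
          rw [h, hcurcont] at hpf; simp at hpf
        have heq₂ : ∀ x : Int, PySem.Set.contains (PySem.Set.add used nb) x
            = (parent.insert nb (some current)).contains x := by
          intro x
          rw [pvSet_contains_add, PySem.Dict.contains_insert, heq, Bool.or_comm]
        have hnd₂ : (parent.insert nb (some current)).keys.Nodup :=
          PySem.Dict.nodup_keys_insert parent nb (some current) hnd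
        have hv₂ : (parent.insert nb (some current)).contains v = true := by
          rw [PySem.Dict.contains_insert, hv]; simp
        have hchain₂ : PChain (parent.insert nb (some current)) current lc :=
          pchain_insert_fresh hcChain hcSub hpf
        have hsub₂ : ∀ n ∈ lc, (parent.insert nb (some current)).contains n = true :=
          fun n hn => by rw [PySem.Dict.contains_insert, hcSub n hn]; simp
        have hpath₂cur :
            (path.insert nb (path.getD current [] ++ [nb])).getD current [] = lc.reverse := by
          rw [PySem.Dict.getD_insert, if_neg (fun h => hnbcur h.symm), hcPath]
        obtain ⟨news, used', path', parent', Iheq, Ihnd, Ihmono, Ihpath, Ihchain, Ihnodup,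
            Ihnews, Ihdisj⟩ :=
          ih (qA ++ [(nb, time)]) (qB ++ [(nb, time)]) (PySem.Set.add used nb)
            (path.insert nb (path.getD current [] ++ [nb])) (parent.insert nb (some current))
            mt sp heq₂ hnd₂ hv₂ ⟨lc, hchain₂, hcNodup, hsub₂, hpath₂cur⟩
        have hmono₂ : ∀ x : Int, parent.contains x = true →
            (parent.insert nb (some current)).contains x = true := fun x hx => by
          rw [PySem.Dict.contains_insert, hx]; simp
        have hne_of_cont : ∀ x : Int, parent.contains x = true → x ≠ nb := by
          intro x hx hxnb
          rw [hxnb, hpf] at hx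
          simp at hx
        have hnbused₂ : PySem.Set.contains (PySem.Set.add used nb) nb = true := by
          rw [pvSet_contains_add]; simp
        have hnbEI : EntryInv parent' path' nb := by
          have hchainnb : PChain (parent.insert nb (some current)) nb (nb :: lc) :=
            PChain.step (by rw [PySem.Dict.getD_insert, if_pos rfl]) hchain₂
          have hnbnotlc : nb ∉ lc := fun hmem => by
            rw [hcSub nb hmem] at hpf; simp at hpf
          have hsubnb : ∀ n ∈ nb :: lc, (parent.insert nb (some current)).contains n = true := by
            intro n hn
            rcases List.mem_cons.mp hn with h | h
            · subst h; rw [PySem.Dict.contains_insert]; simp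
            · exact hsub₂ n h
          have hpathnb :
              (path.insert nb (path.getD current [] ++ [nb])).getD nb [] = (nb :: lc).reverse := by
            rw [PySem.Dict.getD_insert, if_pos rfl, hcPath, List.reverse_cons]
          refine ⟨nb :: lc, Ihchain nb (nb :: lc) hchainnb hsubnb,
            List.nodup_cons.mpr ⟨hnbnotlc, hcNodup⟩,
            fun n hn => Ihmono n (hsubnb n hn), ?_⟩
          rw [Ihpath nb (by rw [PySem.Dict.contains_insert]; simp), hpathnb]
        refine ⟨nb :: news, used', path', parent', Iheq, Ihnd, ?_, ?_, ?_, ?_, ?_, ?_⟩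
        · exact fun x hx => Ihmono x (hmono₂ x hx)
        · intro x hx
          rw [Ihpath x (hmono₂ x hx), PySem.Dict.getD_insert,
            if_neg (hne_of_cont x hx)]
        · intro x l hc hl
          exact Ihchain x l (pchain_insert_fresh hc hl hpf)
            (fun n hn => hmono₂ n (hl n hn))
        · refine List.nodup_cons.mpr ⟨fun hmem => ?_, Ihnodup⟩
          have hcontr := (Ihnews nb hmem).1
          rw [hnbused₂] at hcontr
          simp at hcontr
        · intro y hy
          rcases List.mem_cons.mp hy with h | h
          · subst h; exact ⟨hfresh, hnbEI⟩
          · have h1 := (Ihnews y h).1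
            rw [pvSet_contains_add] at h1
            refine ⟨?_, (Ihnews y h).2⟩
            cases hxy : PySem.Set.contains used y
            · rfl
            · rw [hxy] at h1; simp at h1
        · have hAstep : pvAScan v current time (nb :: rest) qA used path mt sp
              = pvAScan v current time rest (qA ++ [(nb, time)]) (PySem.Set.add used nb)
                (path.insert nb (path.getD current [] ++ [nb])) mt sp := by
            simp [pvAScan, hnmem]
          have hBstep : pvBScan v current time (nb :: rest) qB parent
              = pvBScan v current time rest (qB ++ [(nb, time)])
                (parent.insert nb (some current)) := by
            simp [pvBScan, hnbv, hpf]
          have hmap : (qA ++ [(nb, time)]) ++ news.map (fun y => (y, time))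
              = qA ++ (nb :: news).map (fun y => (y, time)) := by simp
          have hmapB : (qB ++ [(nb, time)]) ++ news.map (fun y => (y, time))
              = qB ++ (nb :: news).map (fun y => (y, time)) := by simp
          have hpcur : (path.insert nb (path.getD current [] ++ [nb])).getD current []
              = path.getD current [] := by
            rw [PySem.Dict.getD_insert, if_neg (fun h => hnbcur h.symm)]
          rcases Ihdisj with ⟨ha, hb⟩ | ⟨ha, hb⟩
          · exact Or.inl ⟨by rw [hAstep, ha, hmap], by rw [hBstep, hb, hmapB]⟩
          · refine Or.inr ⟨?_, by rw [hBstep, hb, hmapB]⟩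
            rw [hAstep, ha, hmap, hpcur]
      · have hused : PySem.Set.contains used nb = true := by
          cases h : PySem.Set.contains used nb
          · exact absurd h hfresh
          · rfl
        have hmem : nb ∈ used := by simpa [PySem.Set.contains] using hused
        have hpc : parent.contains nb = true := by rw [← heq]; exact hused
        obtain ⟨news, used', path', parent', Iheq, Ihnd, Ihmono, Ihpath, Ihchain, Ihnodup,
            Ihnews, Ihdisj⟩ :=
          ih qA qB used path parent mt sp heq hnd hv ⟨lc, hcChain, hcNodup, hcSub, hcPath⟩
        refine ⟨news, used', path', parent', Iheq, Ihnd, Ihmono, Ihpath, Ihchain, Ihnodup,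
          Ihnews, ?_⟩
        have hAstep : pvAScan v current time (nb :: rest) qA used path mt sp
            = pvAScan v current time rest qA used path mt sp := by
          simp [pvAScan, hmem, hnbv]
        have hBstep : pvBScan v current time (nb :: rest) qB parent
            = pvBScan v current time rest qB parent := by
          simp [pvBScan, hnbv, hpc]
        rcases Ihdisj with ⟨ha, hb⟩ | ⟨ha, hb⟩
        · exact Or.inl ⟨by rw [hAstep, ha], by rw [hBstep, hb]⟩
        · exact Or.inr ⟨by rw [hAstep, ha], by rw [hBstep, hb]⟩

theorem pvAWhile_flush (g : PySem.Dict Int (List Int)) (v : Int) :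
    ∀ (f : Nat) (q : List (Int × Int)) (used : PySem.Set Int)
      (path : PySem.Dict Int (List Int)) (m : Int) (sp : List Int),
    (∀ e ∈ q, m ≤ e.2 + 1) →
    pvAWhile g v f q used path (some m) sp = (some m, sp) := by
  intro f
  induction f with
  | zero => intro q used path m sp _; rfl
  | succ f _ =>
    intro q used path m sp hq
    cases q with
    | nil => rfl
    | cons e rest =>
      obtain ⟨c, t0⟩ := e
      have hge : pvGeInf (t0 + 1) (some m) = true := by
        simp only [pvGeInf, decide_eq_true_eq]
        exact hq (c, t0) List.mem_cons_self
      simp [pvAWhile, hge]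

theorem pvWhile_eq (g : PySem.Dict Int (List Int)) (v : Int) :
    ∀ (f : Nat) (qB : List (Int × Int)) (i : Nat) (used : PySem.Set Int)
      (path : PySem.Dict Int (List Int)) (parent : PySem.Dict Int (Option Int))
      (mt : Option Int) (sp : List Int),
    (∀ x : Int, PySem.Set.contains used x = parent.contains x) →
    parent.keys.Nodup →
    parent.contains v = true →
    ((qB.drop i).map Prod.fst).Nodup →
    (qB.drop i).Pairwise (fun a b => a.2 ≤ b.2 ∧ b.2 ≤ a.2 + 1) →
    (∀ e ∈ qB.drop i, EntryInv parent path e.1) →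
    pvAWhile g v f (qB.drop i) used path mt sp = pvBWhile g v f qB i parent mt sp := by
  intro f
  induction f with
  | zero => intros; rfl
  | succ f ihf =>
    intro qB i used path parent mt sp heq hnd hv hqnodup hpw hpend
    have hq0 : qB[i]? = (qB.drop i)[0]? := by simp [List.getElem?_drop]
    cases hdrop : qB.drop i with
    | nil =>
      have hgi : qB[i]? = none := by rw [hq0, hdrop]; rfl
      simp [pvAWhile, pvBWhile, hgi]
    | cons e rest' =>
      obtain ⟨current, t0⟩ := e
      have hgi : qB[i]? = some (current, t0) := by rw [hq0, hdrop]; rfl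
      have hiLt : i < qB.length := by
        by_contra hle
        rw [List.getElem?_eq_none (by omega)] at hgi
        simp at hgi
      rw [hdrop] at hqnodup hpw hpend
      obtain ⟨hcurnot, hrestnd⟩ := List.nodup_cons.mp hqnodup
      obtain ⟨hhead, hrestpw⟩ := List.pairwise_cons.mp hpw
      have hcurE : EntryInv parent path current := hpend (current, t0) List.mem_cons_self
      have hcurcont : parent.contains current = true := by
        obtain ⟨l, c, _, sub, _⟩ := hcurE
        exact sub current (pchain_head_mem c)
      have hcurused : PySem.Set.contains used current = true := by rw [heq]; exact hcurcont
      simp only [pvAWhile, pvBWhile, hgi]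
      by_cases hge : pvGeInf (t0 + 1) mt = true
      · simp [hge]
      · rw [Bool.not_eq_true] at hge
        simp only [hge, Bool.false_eq_true, if_false]
        obtain ⟨news, used', path', parent', Iheq, Ihnd, Ihmono, Ihpath, Ihchain, Ihnodup,
            Ihnews, Ihdisj⟩ :=
          pvScan_eq v current (t0 + 1) (g.getD current []) rest' qB used path parent mt sp
            heq hnd hv hcurE
        have husedmem : ∀ e ∈ rest', PySem.Set.contains used e.1 = true := by
          intro e he
          obtain ⟨l, c, _, sub, _⟩ := hpend e (List.mem_cons_of_mem _ he)
          rw [heq]; exact sub e.1 (pchain_head_mem c)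
        have hnewsfresh : ∀ y ∈ news, PySem.Set.contains used y = false :=
          fun y hy => (Ihnews y hy).1
        rcases Ihdisj with ⟨ha, hb⟩ | ⟨ha, hb⟩
        · -- no cycle found while scanning current's neighbours
          rw [ha, hb]
          have hdrop2 : (qB ++ news.map (fun y => (y, t0 + 1))).drop (i + 1)
              = rest' ++ news.map (fun y => (y, t0 + 1)) := by
            rw [List.drop_append_of_le_length (by omega)]
            have hdd : qB.drop (i + 1) = (qB.drop i).drop 1 := by
              rw [List.drop_drop]
            rw [hdd, hdrop]
            rfl
          have hnpfst : (news.map (fun y => (y, t0 + 1))).map Prod.fst = news := by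
            simp [List.map_map, Function.comp_def]
          have hnodup' : ((rest' ++ news.map (fun y => (y, t0 + 1))).map Prod.fst).Nodup := by
            rw [List.map_append, hnpfst]
            refine List.Nodup.append hrestnd Ihnodup ?_
            intro a ha1 ha2
            have h1 : PySem.Set.contains used a = true := by
              obtain ⟨e, he, rfl⟩ := List.mem_map.mp ha1
              exact husedmem e he
            rw [hnewsfresh a ha2] at h1
            simp at h1
          have hpw' : (rest' ++ news.map (fun y => (y, t0 + 1))).Pairwise
              (fun a b => a.2 ≤ b.2 ∧ b.2 ≤ a.2 + 1) := by
            rw [List.pairwise_append]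
            refine ⟨hrestpw, ?_, ?_⟩
            · rw [List.pairwise_map]
              exact Ihnodup.imp (fun _ => by constructor <;> omega)
            · intro a ha' b hb'
              obtain ⟨y, _, rfl⟩ := List.mem_map.mp hb'
              have hab := hhead a ha'
              exact ⟨by omega, by omega⟩
          have hpend' : ∀ e ∈ rest' ++ news.map (fun y => (y, t0 + 1)),
              EntryInv parent' (path'.erase current) e.1 := by
            intro e he
            rcases List.mem_append.mp he with h | h
            · obtain ⟨l, c, nd, sub, p⟩ := hpend e (List.mem_cons_of_mem _ h)
              have hne : e.1 ≠ current := fun hh =>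
                hcurnot (hh ▸ List.mem_map.mpr ⟨e, h, rfl⟩)
              refine ⟨l, Ihchain e.1 l c sub, nd, fun n hn => Ihmono n (sub n hn), ?_⟩
              rw [pvDict_getD_erase_of_ne _ _ _ _ hne,
                Ihpath e.1 (sub e.1 (pchain_head_mem c)), p]
            · obtain ⟨y, hy, rfl⟩ := List.mem_map.mp h
              obtain ⟨l, c, nd, sub, p⟩ := (Ihnews y hy).2
              have hne : y ≠ current := fun hh => by
                have hf := hnewsfresh y hy
                rw [hh, hcurused] at hf
                simp at hf
              exact ⟨l, c, nd, sub, by rw [pvDict_getD_erase_of_ne _ _ _ _ hne, p]⟩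
          have hmain := ihf (qB ++ news.map (fun y => (y, t0 + 1))) (i + 1) used'
            (path'.erase current) parent' mt sp Iheq Ihnd (Ihmono v hv)
            (hdrop2 ▸ hnodup') (hdrop2 ▸ hpw') (hdrop2 ▸ hpend')
          rw [hdrop2] at hmain
          exact hmain
        · -- cycle found: A flushes its queue, B returns at once
          rw [ha, hb]
          have hflush : pvAWhile g v f (rest' ++ news.map (fun y => (y, t0 + 1))) used'
              (path'.erase current) (some (t0 + 1)) (path.getD current [] ++ [v])
              = (some (t0 + 1), path.getD current [] ++ [v]) := by
            apply pvAWhile_flush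
            intro e he
            rcases List.mem_append.mp he with h | h
            · have := hhead e h; omega
            · obtain ⟨y, _, rfl⟩ := List.mem_map.mp h; omega
          obtain ⟨lc, hcChain, hcNodup, hcSub, hcPath⟩ := hcurE
          have hchain' : PChain parent' current lc := Ihchain current lc hcChain hcSub
          have hsub' : ∀ n ∈ lc, parent'.contains n = true :=
            fun n hn => Ihmono n (hcSub n hn)
          have hsubkeys : lc ⊆ parent'.keys := fun n hn =>
            (PySem.Dict.contains_iff_mem_keys _ _).mp (hsub' n hn)
          have hlen : lc.length ≤ parent'.size := by
            have h1 := (List.subperm_of_subset hcNodup hsubkeys).length_le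
            simpa [PySem.Dict.keys, PySem.Dict.size] using h1
          refine hflush.trans ?_
          rw [pvClimb_eq hchain' (parent'.size + 1) (by omega), hcPath]
          simp

theorem find_min_cycle_spec : Claim_equal_find_min_cycle := by
  intro graph _
  unfold Spec_find_min_cycle find_min_cycle find_min_cycle_alt
  apply congrArg Prod.snd
  apply PySem.List.foldl_congr_mem
  intro acc v _
  have heq : ∀ x : Int, PySem.Set.contains (PySem.Set.ofList [v]) x
      = ((PySem.Dict.empty).insert v (none : Option Int)).contains x := by
    intro x
    rw [PySem.Dict.contains_insert, PySem.Dict.contains_empty]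
    by_cases h : x = v <;>
      simp [PySem.Set.ofList, PySem.Set.add, PySem.Set.contains, h]
  have hnd : ((PySem.Dict.empty : PySem.Dict Int (Option Int)).insert v none).keys.Nodup :=
    PySem.Dict.nodup_keys_insert PySem.Dict.empty v none PySem.Dict.nodup_keys_empty
  have hv : ((PySem.Dict.empty : PySem.Dict Int (Option Int)).insert v none).contains v
      = true := by
    rw [PySem.Dict.contains_insert]; simp
  have hpend : ∀ e ∈ ([((v : Int), (0 : Int))].drop 0),
      EntryInv ((PySem.Dict.empty).insert v (none : Option Int))
        ((PySem.Dict.empty).insert v [v]) e.1 := by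
    intro e he
    simp only [List.drop_zero, List.mem_singleton] at he
    subst he
    refine ⟨[v], PChain.last ?_, by simp, ?_, ?_⟩
    · rw [PySem.Dict.getD_insert, if_pos rfl]
    · intro n hn
      simp only [List.mem_singleton] at hn
      subst hn
      rw [PySem.Dict.contains_insert]; simp
    · rw [PySem.Dict.getD_insert, if_pos rfl]; simp
  have hmain := pvWhile_eq (PySem.Dict.mk graph) v ((graph.flatMap (fun p => p.2)).length + 2)
    [((v : Int), (0 : Int))] 0 (PySem.Set.ofList [v]) ((PySem.Dict.empty).insert v [v])
    ((PySem.Dict.empty).insert v (none : Option Int)) acc.1 acc.2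
    heq hnd hv (by simp) (by simp) hpend
  simpa using hmain
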